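-- pv_equiv track=rewrite | github.com/dragazo/PyBlox | netsblox/transform.py | trailing_indent
-- ===== SOURCE A (Python) =====
-- def trailing_indent(txt: str) -> str:
--     i = len(txt)
--     while i > 0:
--         ch = txt[i - 1]
--         if ch == '\n' or not ch.isspace():
--             return txt[i:]
--         i -= 1
--     return txt
-- ===== SOURCE B (Python) =====
-- def trailing_indent(txt: str) -> str:
--     tail = txt[txt.rfind('\n') + 1:]
--     return tail[len(tail.rstrip()):]
-- ===== Notes on version B (the rewrite author's own statement) =====
-- stated objective: idiomatic
-- what changed: Replaces the manual backward character-by-character scan with two library calls: take the segment after the last newline via rfind, then return its trailing whitespace via rstrip and a length-based slice.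
import Mathlib
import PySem

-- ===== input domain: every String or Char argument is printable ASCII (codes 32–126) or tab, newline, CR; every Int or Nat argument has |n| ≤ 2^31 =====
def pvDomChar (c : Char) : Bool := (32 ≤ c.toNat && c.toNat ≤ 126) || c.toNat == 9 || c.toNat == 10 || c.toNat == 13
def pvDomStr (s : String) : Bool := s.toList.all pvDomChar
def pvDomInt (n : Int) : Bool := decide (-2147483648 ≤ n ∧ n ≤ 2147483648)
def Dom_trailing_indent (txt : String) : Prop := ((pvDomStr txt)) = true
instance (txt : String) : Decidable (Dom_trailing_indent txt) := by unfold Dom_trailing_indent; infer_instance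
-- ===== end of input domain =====

-- B replaces A's manual backward character scan by library calls: rfind('\n') to cut off
-- everything up to the last newline, then rstrip to locate the trailing whitespace (idiomatic).

-- ===== PORT A =====
-- A's while loop, counting Python's i down from len(txt); the pattern 'i + 1' here is Python's i
def tiGo (cs : List Char) : Nat → List Char
  | 0 => cs
  | i + 1 =>
    let ch := PySem.List.pyGetD cs (i : Int) ' '
    if ch == '\n' || !(PySem.Chars.isspace ch) then
      PySem.List.slice cs (some ((i : Int) + 1)) none
    else
      tiGo cs i

def trailing_indent (txt : String) : String :=
  String.ofList (tiGo txt.toList txt.toList.length)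

-- ===== PORT B =====
def trailing_indent_alt (txt : String) : String :=
  let cs := txt.toList
  let tail := PySem.List.slice cs (some (PySem.Chars.rfind cs ['\n'] + 1)) none
  String.ofList (PySem.List.slice tail (some ((PySem.Chars.rstrip tail).length : Int)) none)

-- ===== PRECONDITION & SPEC =====
def Spec_trailing_indent (txt : String) (out : String) : Prop := out = trailing_indent_alt txt
instance (txt : String) (out : String) : Decidable (Spec_trailing_indent txt out) := by unfold Spec_trailing_indent; infer_instance

-- ===== CLAIM (what is proved, stated in full; the proofs are below) =====
def Claim_equal_trailing_indent : Prop := ∀ (txt : String), Dom_trailing_indent txt → Spec_trailing_indent txt (trailing_indent txt)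

-- ===== LEMMAS AND PROOFS =====

-- the "keep scanning" predicate of A: whitespace but not a newline
def tiP (c : Char) : Bool := !(c == '\n') && PySem.Chars.isspace c

theorem nl_mem_of_prefix {l : List Char} (hpre : (['\n'] : List Char).isPrefixOf l = true) :
    '\n' ∈ l := by
  obtain ⟨t, ht⟩ := List.isPrefixOf_iff_prefix.mp hpre
  rw [← ht]; simp

theorem takeWhile_congr' {α : Type} (p q : α → Bool) (l : List α)
    (h : ∀ x ∈ l, p x = q x) : l.takeWhile p = l.takeWhile q := by
  induction l with
  | nil => rfl
  | cons a as ih =>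
    have ha : p a = q a := h a (by simp)
    by_cases hq : q a = true
    · rw [List.takeWhile_cons_of_pos (ha ▸ hq), List.takeWhile_cons_of_pos hq,
        ih (fun x hx => h x (by simp [hx]))]
    · rw [List.takeWhile_cons_of_neg (by simp_all), List.takeWhile_cons_of_neg (by simp_all)]

theorem takeWhile_last_block {P : Char → Bool} (xs : List Char) (y : Char) (ys : List Char)
    (hxs : ∀ x ∈ xs, P x = true) (hy : P y = false) :
    (xs ++ y :: ys).takeWhile P = xs := by
  induction xs with
  | nil => simpa using List.takeWhile_cons_of_neg (p := P) (a := y) (l := ys) (by simp [hy])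
  | cons a as ih =>
    simp only [List.cons_append]
    rw [List.takeWhile_cons_of_pos (hxs a (by simp))]
    rw [ih (fun x hx => hxs x (by simp [hx]))]

theorem drop_sub_takeWhile (P : Char → Bool) (cs : List Char) :
    cs.drop (cs.length - (cs.reverse.takeWhile P).length) = (cs.reverse.takeWhile P).reverse := by
  set tw := cs.reverse.takeWhile P with htw
  set dw := cs.reverse.dropWhile P with hdw
  have hsplit : cs.reverse = tw ++ dw := (List.takeWhile_append_dropWhile).symm
  have hcs : cs = dw.reverse ++ tw.reverse := by
    apply List.reverse_injective
    rw [hsplit, List.reverse_append, List.reverse_reverse, List.reverse_reverse]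
  have h1 : cs.length = tw.length + dw.length := by
    have := congrArg List.length hsplit
    simpa using this
  have h2 : cs.length - tw.length = dw.reverse.length := by
    simp only [List.length_reverse]; omega
  rw [h2]
  conv_lhs => rw [hcs]
  exact List.drop_left

-- tail[len(tail.rstrip()):] is the trailing-whitespace suffix of tail
theorem rstrip_drop (tail : List Char) :
    tail.drop (PySem.Chars.rstrip tail).length
      = (tail.reverse.takeWhile PySem.Chars.isspace).reverse := by
  simp only [PySem.Chars.rstrip]
  set tw := tail.reverse.takeWhile PySem.Chars.isspace with htw
  set dw := tail.reverse.dropWhile PySem.Chars.isspace with hdw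
  have hsplit : tail.reverse = tw ++ dw := (List.takeWhile_append_dropWhile).symm
  have hcs : tail = dw.reverse ++ tw.reverse := by
    apply List.reverse_injective
    rw [hsplit, List.reverse_append, List.reverse_reverse, List.reverse_reverse]
  rw [List.length_reverse]
  conv_lhs => rw [hcs]
  rw [show dw.length = dw.reverse.length by simp]
  exact List.drop_left

theorem rfind_go_none (cs : List Char) (h : '\n' ∉ cs) :
    ∀ j, PySem.Chars.rfind.go cs ['\n'] j = -1 := by
  intro j
  induction j with
  | zero =>
    rw [PySem.Chars.rfind.go, if_neg]
    intro hpre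
    exact h (nl_mem_of_prefix hpre)
  | succ j ih =>
    rw [PySem.Chars.rfind.go, if_neg, ih]
    intro hpre
    exact h (List.mem_of_mem_drop (nl_mem_of_prefix hpre))

theorem rfind_go_found (pre suf : List Char) (h : '\n' ∉ suf) :
    ∀ d, PySem.Chars.rfind.go (pre ++ '\n' :: suf) ['\n'] (pre.length + d) = pre.length := by
  intro d
  induction d with
  | zero =>
    simp only [Nat.add_zero]
    rcases hp : pre.length with _ | k
    · have hpre0 : pre = [] := List.length_eq_zero_iff.mp hp
      subst hpre0
      rw [PySem.Chars.rfind.go, if_pos (by simp [List.isPrefixOf])]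
      simp
    · rw [PySem.Chars.rfind.go]
      have hpre : (['\n'] : List Char).isPrefixOf ((pre ++ '\n' :: suf).drop (k + 1)) = true := by
        rw [← hp, List.drop_left]
        simp [List.isPrefixOf]
      rw [if_pos hpre]
  | succ d ih =>
    have hs : pre.length + (d + 1) = (pre.length + d) + 1 := by omega
    rw [hs, PySem.Chars.rfind.go, if_neg, ih]
    intro hpre
    have hdrop : (pre ++ '\n' :: suf).drop (pre.length + d + 1) = suf.drop d := by
      have he : pre ++ '\n' :: suf = (pre ++ ['\n']) ++ suf := by simp
      rw [he, List.drop_append]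
      simp
    rw [hdrop] at hpre
    exact h (List.mem_of_mem_drop (nl_mem_of_prefix hpre))

theorem last_nl_decomp (cs : List Char) (h : '\n' ∈ cs) :
    ∃ pre suf, cs = pre ++ '\n' :: suf ∧ '\n' ∉ suf := by
  induction cs with
  | nil => simp at h
  | cons c rest ih =>
    by_cases hr : '\n' ∈ rest
    · obtain ⟨pre, suf, heq, hn⟩ := ih hr
      exact ⟨c :: pre, suf, by simp [heq], hn⟩
    · have hc : c = '\n' := by
        rcases List.mem_cons.mp h with h1 | h1
        · exact h1.symm
        · exact absurd h1 hr
      exact ⟨[], rest, by simp [hc], hr⟩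

theorem tiGo_eq (cs : List Char) : ∀ i, i ≤ cs.length →
    tiGo cs i = cs.drop (i - ((cs.take i).reverse.takeWhile tiP).length) := by
  intro i
  induction i with
  | zero => intro _; simp [tiGo]
  | succ i ih =>
    intro h
    have hi : i < cs.length := by omega
    have hget : PySem.List.pyGetD cs (i : Int) ' ' = cs[i] :=
      PySem.List.pyGetD_ofNat cs i ' ' hi
    have htake : (cs.take (i+1)).reverse = cs[i] :: (cs.take i).reverse := by
      rw [List.take_add_one]
      simp [List.getElem?_eq_getElem hi]
    rw [tiGo]
    simp only [hget]
    by_cases hp : tiP cs[i] = true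
    · have hcond : (cs[i] == '\n' || !(PySem.Chars.isspace cs[i])) = false := by
        simp [tiP] at hp ⊢
        exact ⟨hp.1, hp.2⟩
      rw [if_neg (by simp [hcond])]
      rw [ih (by omega), htake]
      rw [List.takeWhile_cons_of_pos hp]
      simp only [List.length_cons]
      congr 1
      omega
    · have hcond : (cs[i] == '\n' || !(PySem.Chars.isspace cs[i])) = true := by
        simp [tiP] at hp ⊢
        by_cases hn : cs[i] = '\n'
        · left; exact hn
        · right; exact hp hn
      rw [if_pos (by simp [hcond])]
      rw [htake, List.takeWhile_cons_of_neg (by simp [hp])]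
      have : ((i : Int) + 1) = ((i + 1 : Nat) : Int) := by push_cast; ring
      rw [this, PySem.List.slice_from_natCast]
      simp

-- the list computed by A
theorem A_list (cs : List Char) :
    tiGo cs cs.length = (cs.reverse.takeWhile tiP).reverse := by
  rw [tiGo_eq cs cs.length (le_refl _), List.take_length]
  exact drop_sub_takeWhile tiP cs

-- the list computed by B
theorem B_list (cs : List Char) :
    PySem.List.slice
      (PySem.List.slice cs (some (PySem.Chars.rfind cs ['\n'] + 1)) none)
      (some ((PySem.Chars.rstrip (PySem.List.slice cs (some (PySem.Chars.rfind cs ['\n'] + 1)) none)).length : Int)) none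
      = (cs.reverse.takeWhile tiP).reverse := by
  by_cases h : '\n' ∈ cs
  · obtain ⟨pre, suf, heq, hsuf⟩ := last_nl_decomp cs h
    subst heq
    have hlen : (pre ++ '\n' :: suf).length = pre.length + (suf.length + 1) := by
      simp
    have hrf : PySem.Chars.rfind (pre ++ '\n' :: suf) ['\n'] = pre.length := by
      rw [PySem.Chars.rfind, hlen]
      exact rfind_go_found pre suf hsuf (suf.length + 1)
    have htail : PySem.List.slice (pre ++ '\n' :: suf)
        (some (PySem.Chars.rfind (pre ++ '\n' :: suf) ['\n'] + 1)) none = suf := by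
      rw [hrf]
      rw [show ((pre.length : Int) + 1) = ((pre.length + 1 : Nat) : Int) by push_cast; ring]
      rw [PySem.List.slice_from_natCast]
      rw [show pre ++ '\n' :: suf = (pre ++ ['\n']) ++ suf by simp]
      rw [show pre.length + 1 = (pre ++ ['\n']).length by simp]
      exact List.drop_left
    rw [htail, PySem.List.slice_from_natCast, rstrip_drop]
    have hrev : (pre ++ '\n' :: suf).reverse = suf.reverse ++ '\n' :: pre.reverse := by
      simp
    have hq : (suf.reverse ++ '\n' :: pre.reverse).takeWhile (fun c => !(c == '\n'))
        = suf.reverse := by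
      apply takeWhile_last_block
      · intro x hx
        have hxne : x ≠ '\n' := fun hxe => hsuf (by simpa [hxe] using (List.mem_reverse.mp hx))
        simp [hxne]
      · simp
    have hcomb : (suf.reverse ++ '\n' :: pre.reverse).takeWhile tiP
        = suf.reverse.takeWhile PySem.Chars.isspace := by
      rw [takeWhile_congr' tiP
        (fun a => decide (PySem.Chars.isspace a = true ∧ (!(a == '\n')) = true)) _
        (by intro x _; by_cases hx : x = '\n' <;> simp [tiP, hx])]
      rw [← List.takeWhile_takeWhile, hq]
    rw [hrev, hcomb]
  · have hrf : PySem.Chars.rfind cs ['\n'] = -1 := by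
      rw [PySem.Chars.rfind]
      exact rfind_go_none cs h _
    rw [hrf]
    norm_num
    rw [rstrip_drop]
    congr 1
    apply takeWhile_congr'
    intro x hx
    have hxne : x ≠ '\n' := fun hxe => h (by simpa [hxe] using (List.mem_reverse.mp hx))
    simp [tiP, hxne]

-- ===== VERDICT (by name: the statement is the Claim_ definition above) =====
theorem trailing_indent_spec : Claim_equal_trailing_indent := by
  intro txt _
  unfold Spec_trailing_indent trailing_indent trailing_indent_alt
  simp only [A_list, B_list]
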